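-- pv_equiv track=rewrite | github.com/apatros-dessel/image_process | test_105_organize_folders.py | XLSDictIds
-- ===== SOURCE A (Python) =====
-- def XLSDictIds(xls_dict):
--     if xls_dict:
--         ids = {}
--         for qlid in xls_dict:
--             id = '_'.join(qlid.split('_')[:-1]) + '.L2'
--             if id in ids:
--                 ids[id].append(qlid)
--             else:
--                 ids[id] = [qlid]
--         return ids
-- ===== SOURCE B (Python) =====
-- def XLSDictIds(xls_dict):
--     if not xls_dict:
--         return None
--     keys = list(xls_dict)
--     ids = ['_'.join(k.split('_')[:-1]) + '.L2' for k in keys]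
--     return {i: [k for k, d in zip(keys, ids) if d == i]
--             for i in dict.fromkeys(ids)}
-- ===== Notes on version B (the rewrite author's own statement) =====
-- stated objective: alternative
-- what changed: B replaces A's incremental dict-building loop (membership test, then append-or-create per key) with a declarative two-step: derive all ids once, then build the result as a comprehension mapping each first-occurrence-deduped id to the filter of the keys carrying it.
import Mathlib
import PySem

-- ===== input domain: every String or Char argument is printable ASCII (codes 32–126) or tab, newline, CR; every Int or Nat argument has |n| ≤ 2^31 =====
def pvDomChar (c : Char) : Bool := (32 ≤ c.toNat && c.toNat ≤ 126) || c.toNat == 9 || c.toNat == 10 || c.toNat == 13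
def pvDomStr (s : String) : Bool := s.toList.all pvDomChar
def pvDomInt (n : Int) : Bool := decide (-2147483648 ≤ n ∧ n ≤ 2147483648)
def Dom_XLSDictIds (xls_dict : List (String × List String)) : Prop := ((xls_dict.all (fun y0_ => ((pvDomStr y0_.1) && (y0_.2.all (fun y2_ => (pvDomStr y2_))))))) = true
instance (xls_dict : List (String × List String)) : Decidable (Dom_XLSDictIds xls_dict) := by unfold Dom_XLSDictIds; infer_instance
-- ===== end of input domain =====

-- B groups the keys in one declarative comprehension (filter per deduped derived id)
-- instead of A's incremental dict-building loop; objective: alternative decomposition, not faster.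

-- id-derivation both Pythons write literally: '_'.join(qlid.split('_')[:-1]) + '.L2'
-- (split? is exact for the nonempty literal separator "_"; the getD [] branch is unreachable)
def pvDerive (qlid : String) : String :=
  PySem.Str.join "_" (PySem.List.slice ((PySem.Str.split? qlid "_").getD []) none (some (-1))) ++ ".L2"

-- ===== PORT A =====
def XLSDictIds (xls_dict : List (String × List String)) : Option (List (String × List String)) :=
  if xls_dict.isEmpty then none
  else
    some (((xls_dict.map Prod.fst).foldl
      (fun (ids : PySem.Dict String (List String)) qlid =>
        let id := pvDerive qlid
        if ids.contains id then ids.insert id (ids.getD id [] ++ [qlid])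
        else ids.insert id [qlid])
      PySem.Dict.empty).items)

-- ===== PORT B =====
def XLSDictIds_alt (xls_dict : List (String × List String)) : Option (List (String × List String)) :=
  if xls_dict.isEmpty then none
  else
    let keys := xls_dict.map Prod.fst
    let ids := keys.map pvDerive
    some ((PySem.List.dedup ids).map
      (fun i => (i, ((keys.zip ids).filter (fun p => p.2 == i)).map Prod.fst)))

-- ===== PRECONDITION & SPEC =====
def Spec_XLSDictIds (xls_dict : List (String × List String)) (out : Option (List (String × List String))) : Prop := out = XLSDictIds_alt xls_dict
instance (xls_dict : List (String × List String)) (out : Option (List (String × List String))) : Decidable (Spec_XLSDictIds xls_dict out) := by unfold Spec_XLSDictIds; infer_instance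

-- ===== CLAIM (what is proved, stated in full; the proofs are below) =====
def Claim_equal_XLSDictIds : Prop := ∀ (xls_dict : List (String × List String)), Dom_XLSDictIds xls_dict → Spec_XLSDictIds xls_dict (XLSDictIds xls_dict)

-- ===== LEMMAS AND PROOFS =====

-- B's inner comprehension: filtering the (key, id) zip and projecting keys is filtering the keys.
lemma pv_zip_filter (f : String → String) (ks : List String) (i : String) :
    ((ks.zip (ks.map f)).filter (fun p => p.2 == i)).map Prod.fst
      = ks.filter (fun k => f k == i) := by
  induction ks with
  | nil => rfl
  | cons k t ih =>
    by_cases h : f k = i <;> simp [h, ih]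

-- appending one element to the deduplicated id list
lemma pv_ofList_append (f : String → String) (l : List String) (k : String) :
    PySem.Set.ofList ((l ++ [k]).map f) = PySem.Set.add (PySem.Set.ofList (l.map f)) (f k) := by
  simp only [List.map_append, List.map_cons, List.map_nil]
  rw [PySem.Set.ofList_eq_foldl, List.foldl_append, ← PySem.Set.ofList_eq_foldl]
  rfl

-- A's grouping loop, characterised: its items are exactly B's per-id groups.
lemma pv_fold_items (f : String → String) (ks : List String) :
    (ks.foldl
        (fun (ids : PySem.Dict String (List String)) q =>
          let id := f q
          if ids.contains id then ids.insert id (ids.getD id [] ++ [q])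
          else ids.insert id [q])
        PySem.Dict.empty).items
      = (PySem.Set.ofList (ks.map f)).map
          (fun i => (i, ks.filter (fun k => f k == i))) := by
  induction ks using List.reverseRecOn with
  | nil => rfl
  | append_singleton l k ih =>
    rw [List.foldl_append, List.foldl_cons, List.foldl_nil]
    set d := l.foldl
        (fun (ids : PySem.Dict String (List String)) q =>
          let id := f q
          if ids.contains id then ids.insert id (ids.getD id [] ++ [q])
          else ids.insert id [q])
        PySem.Dict.empty with hd
    have hkeys : d.keys = PySem.Set.ofList (l.map f) := by
      show d.items.map (fun x => x.1) = _
      rw [ih, List.map_map]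
      exact List.map_id' _
    have hnd : d.keys.Nodup := by rw [hkeys]; exact PySem.Set.nodup_ofList _
    have hcont : d.contains (f k) = decide (f k ∈ l.map f) := by
      rw [PySem.Dict.contains_eq_decide_mem_keys, hkeys]
      by_cases h : f k ∈ l.map f <;> simp [h, PySem.Set.mem_ofList]
    by_cases hmem : f k ∈ l.map f
    · -- the derived id was already a key: overwrite in place
      have hc : d.contains (f k) = true := by simp [hcont, hmem]
      have hget : d.getD (f k) [] = l.filter (fun k' => f k' == f k) := by
        apply PySem.Dict.getD_of_mem_items _ _ hnd
        rw [ih]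
        exact List.mem_map_of_mem ((PySem.Set.mem_ofList _ _).mpr hmem)
      have hset : PySem.Set.ofList ((l ++ [k]).map f) = PySem.Set.ofList (l.map f) := by
        rw [pv_ofList_append]
        have hm : f k ∈ PySem.Set.ofList (l.map f) := (PySem.Set.mem_ofList _ _).mpr hmem
        simp [PySem.Set.add, PySem.Set.contains, hm]
      simp only [hc, if_true]
      rw [PySem.Dict.items_insert_of_contains _ _ hc, ih, hget, hset, List.map_map]
      apply List.map_congr_left
      intro i hi
      by_cases h : i = f k
      · subst h; simp [List.filter_append]
      · have hne : ¬ (i == f k) = true := by simp [h]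
        simp only [Function.comp]
        simp [hne, List.filter_append, Ne.symm h]
    · -- a fresh derived id: appended at the end
      have hc : d.contains (f k) = false := by simp [hcont, hmem]
      have hset : PySem.Set.ofList ((l ++ [k]).map f)
          = PySem.Set.ofList (l.map f) ++ [f k] := by
        rw [pv_ofList_append]
        have hm : f k ∉ PySem.Set.ofList (l.map f) := fun h =>
          hmem ((PySem.Set.mem_ofList _ _).mp h)
        simp [PySem.Set.add, PySem.Set.contains, hm]
      have hnew : (l ++ [k]).filter (fun k' => f k' == f k) = [k] := by
        rw [List.filter_append]
        have hnil : l.filter (fun k' => f k' == f k) = [] := by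
          apply List.filter_eq_nil_iff.mpr
          intro a ha
          simp only [beq_iff_eq]
          exact fun h => hmem (h ▸ List.mem_map_of_mem ha)
        simp [hnil]
      rw [if_neg (by simp [hc]), PySem.Dict.items_insert_of_not_contains _ _ hc, ih, hset,
        List.map_append]
      congr 1
      · apply List.map_congr_left
        intro i hi
        have hne : i ≠ f k := by
          rw [PySem.Set.mem_ofList] at hi
          exact fun h => hmem (h ▸ hi)
        simp [List.filter_append, Ne.symm hne]
      · simp only [List.map_cons, List.map_nil, hnew]

-- ===== VERDICT (by name: the statement is the Claim_ definition above) =====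
theorem XLSDictIds_spec : Claim_equal_XLSDictIds := by
  intro xls_dict _
  unfold Spec_XLSDictIds XLSDictIds XLSDictIds_alt
  by_cases h : xls_dict.isEmpty
  · simp [h]
  · simp only [h, Bool.false_eq_true, if_false]
    rw [pv_fold_items pvDerive (xls_dict.map Prod.fst)]
    simp only [PySem.List.dedup]
    exact congrArg some (List.map_congr_left (fun i _ => by rw [pv_zip_filter]))
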